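-- pv_equiv track=rewrite | github.com/dancb10/ppscu.com | Stuff/scratch_8.py | displaywords
-- ===== SOURCE A (Python) =====
-- def displaywords(sentence):
--     slice=''
--     wordstodisplay=''
--     for character in sentence:
--         if character.isalpha():
--             slice=slice+character
--         else:
--             wordstodisplay=wordstodisplay+slice[::-1]+character
--             slice=''
--     return wordstodisplay+slice[::-1]
-- ===== SOURCE B (Python) =====
-- def displaywords(sentence):
--     out = []
--     i, n = 0, len(sentence)
--     while i < n:
--         k = sentence[i].isalpha()
--         j = i
--         while j < n and sentence[j].isalpha() == k:
--             j += 1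
--         run = sentence[i:j]
--         out.append(run[::-1] if k else run)
--         i = j
--     return ''.join(out)
-- ===== Notes on version B (the rewrite author's own statement) =====
-- stated objective: alternative
-- what changed: Replaces the char-by-char accumulator with repeated string concatenation by a two-pointer scan over maximal alpha/non-alpha runs, reversing alpha runs and joining the pieces once at the end.
import Mathlib
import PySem

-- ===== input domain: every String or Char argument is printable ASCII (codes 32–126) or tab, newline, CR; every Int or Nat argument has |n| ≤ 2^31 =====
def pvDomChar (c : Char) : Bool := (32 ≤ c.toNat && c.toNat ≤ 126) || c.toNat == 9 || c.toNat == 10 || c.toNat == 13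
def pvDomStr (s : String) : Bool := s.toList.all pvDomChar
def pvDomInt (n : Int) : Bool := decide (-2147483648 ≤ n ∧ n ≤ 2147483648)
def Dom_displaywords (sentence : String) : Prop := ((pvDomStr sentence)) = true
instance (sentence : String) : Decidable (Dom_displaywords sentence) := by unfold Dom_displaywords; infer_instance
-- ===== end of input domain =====

-- B reverses each maximal alphabetic run via a two-pointer run scan with a single join, instead of A's per-character accumulator with repeated string concatenation.

-- ===== PORT A =====
-- the loop of A: state = (slice, wordstodisplay) as char lists; slice[::-1] is List.reverse
def pvALoop : List Char → List Char → List Char → List Char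
  | [], slice, out => out ++ slice.reverse
  | c :: rest, slice, out =>
    if PySem.Chars.isalpha c then pvALoop rest (slice ++ [c]) out
    else pvALoop rest [] (out ++ slice.reverse ++ [c])

def displaywords (sentence : String) : String :=
  String.mk (pvALoop sentence.toList [] [])

-- ===== PORT B =====
-- outer while loop of B: take the maximal run with the same isalpha key (inner while),
-- reverse it iff the key is true, recurse on the remainder; join = flatten of the pieces
def pvBRun : List Char → List Char
  | [] => []
  | c :: rest =>
    let p : Char → Bool := fun x => PySem.Chars.isalpha x == PySem.Chars.isalpha c
    let run := (c :: rest).takeWhile p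
    let rest' := (c :: rest).dropWhile p
    (if PySem.Chars.isalpha c then run.reverse else run) ++ pvBRun rest'
termination_by l => l.length
decreasing_by
  simp only [List.dropWhile_cons, p, BEq.rfl, if_true]
  exact Nat.lt_succ_of_le (List.length_dropWhile_le _ _)

def displaywords_alt (sentence : String) : String :=
  String.mk (pvBRun sentence.toList)

-- ===== PRECONDITION & SPEC =====
def Spec_displaywords (sentence : String) (out : String) : Prop := out = displaywords_alt sentence
instance (sentence : String) (out : String) : Decidable (Spec_displaywords sentence out) := by unfold Spec_displaywords; infer_instance

-- ===== CLAIM (what is proved, stated in full; the proofs are below) =====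
def Claim_equal_displaywords : Prop := ∀ (sentence : String), Dom_displaywords sentence → Spec_displaywords sentence (displaywords sentence)

-- ===== LEMMAS AND PROOFS =====

-- A's loop restated without the output accumulator
def pvG : List Char → List Char → List Char
  | slice, [] => slice.reverse
  | slice, c :: rest =>
    if PySem.Chars.isalpha c then pvG (slice ++ [c]) rest
    else slice.reverse ++ c :: pvG [] rest

lemma pvALoop_eq_g : ∀ (l slice out : List Char),
    pvALoop l slice out = out ++ pvG slice l := by
  intro l
  induction l with
  | nil => intro slice out; simp [pvALoop, pvG]
  | cons c rest ih =>
    intro slice out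
    simp only [pvALoop, pvG]
    split_ifs with h
    · simp [ih]
    · simp [ih]

lemma pvG_takeWhile : ∀ (l slice : List Char),
    pvG slice l = (slice ++ l.takeWhile PySem.Chars.isalpha).reverse ++
      (match l.dropWhile PySem.Chars.isalpha with
       | [] => []
       | c :: r => c :: pvG [] r) := by
  intro l
  induction l with
  | nil => intro slice; simp [pvG]
  | cons c rest ih =>
    intro slice
    simp only [pvG, List.takeWhile_cons, List.dropWhile_cons]
    split_ifs with h <;> simp [h, ih, List.append_assoc]

lemma pvG_nonalpha_prefix : ∀ (l : List Char),
    pvG [] l = l.takeWhile (fun x => !PySem.Chars.isalpha x) ++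
      pvG [] (l.dropWhile (fun x => !PySem.Chars.isalpha x)) := by
  intro l
  induction l with
  | nil => simp [pvG]
  | cons c rest ih =>
    by_cases h : PySem.Chars.isalpha c
    · simp [List.takeWhile_cons, List.dropWhile_cons, h]
    · simp only [List.takeWhile_cons, List.dropWhile_cons, h, Bool.not_false, if_true]
      simp [pvG, h, ih]

lemma dropWhile_head_false (p : Char → Bool) : ∀ (l : List Char),
    (match l.dropWhile p with | [] => True | x :: _ => p x = false) := by
  intro l
  induction l with
  | nil => simp
  | cons c rest ih =>
    simp only [List.dropWhile_cons]
    split_ifs with h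
    · exact ih
    · simpa using h

lemma pvBRun_eq_g (n : Nat) : ∀ (l : List Char), l.length ≤ n → pvBRun l = pvG [] l := by
  induction n with
  | zero =>
    intro l hl
    have : l = [] := List.eq_nil_of_length_eq_zero (Nat.le_zero.mp hl)
    simp [this, pvBRun, pvG]
  | succ n ih =>
    intro l hl
    match l with
    | [] => simp [pvBRun, pvG]
    | c :: rest =>
      simp only [List.length_cons] at hl
      by_cases h : PySem.Chars.isalpha c
      · -- alpha run
        have hp : (fun x => PySem.Chars.isalpha x == PySem.Chars.isalpha c)
            = PySem.Chars.isalpha := by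
          funext x; rw [h]; cases hx : PySem.Chars.isalpha x <;> simp
        rw [pvBRun, hp]
        simp only [h, if_true]
        rw [pvG_takeWhile]
        simp only [List.nil_append]
        congr 1
        have hlen : ((c :: rest).dropWhile PySem.Chars.isalpha).length ≤ n := by
          simp only [List.dropWhile_cons, h, if_true]
          have := List.length_dropWhile_le PySem.Chars.isalpha rest
          omega
        rw [ih _ hlen]
        have hrest' := dropWhile_head_false PySem.Chars.isalpha (c :: rest)
        revert hrest'
        cases hdw : (c :: rest).dropWhile PySem.Chars.isalpha with
        | nil => simp [pvG]
        | cons d r =>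
          intro hd
          rw [pvG]
          simp [hd]
      · -- non-alpha run
        rw [Bool.not_eq_true] at h
        have hp : (fun x => PySem.Chars.isalpha x == PySem.Chars.isalpha c)
            = (fun x => !PySem.Chars.isalpha x) := by
          funext x; rw [h]; cases hx : PySem.Chars.isalpha x <;> simp
        rw [pvBRun, hp,
          show pvG [] (c :: rest) = c :: pvG [] rest from by rw [pvG]; simp [h]]
        have hlen : (rest.dropWhile (fun x => !PySem.Chars.isalpha x)).length ≤ n := by
          have := List.length_dropWhile_le (fun x => !PySem.Chars.isalpha x) rest
          omega
        simp only [h, List.takeWhile_cons, List.dropWhile_cons, Bool.not_false, if_true,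
          Bool.false_eq_true, if_false, List.cons_append]
        rw [ih _ hlen, ← pvG_nonalpha_prefix rest]

-- ===== VERDICT (by name: the statement is the Claim_ definition above) =====
theorem displaywords_spec : Claim_equal_displaywords := by
  intro s _
  show displaywords s = displaywords_alt s
  unfold displaywords displaywords_alt
  rw [pvALoop_eq_g, pvBRun_eq_g s.toList.length _ (le_refl _)]
  simp
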